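-- pv_equiv track=rewrite | github.com/baeksoojin/CodingTest | 프로그래머스/2/17677. ［1차］ 뉴스 클러스터링/［1차］ 뉴스 클러스터링.py | get_split_list
-- ===== SOURCE A (Python) =====
-- def get_split_list(str):
--
--     result = []
--     current = ""
--     for i in range(len(str)):
--         if 'a' <= str[i] <='z' or 'A' <= str[i] <= 'Z':
--             current += str[i].lower()
--         else:
--             current = ""
--
--         if len(current)==2:
--             result.append(current)
--             current = current[-1]
--     return result
-- ===== SOURCE B (Python) =====
-- def get_split_list(str):
--     result = []
--     for a, b in zip(str, str[1:]):
--         if ('a' <= a <= 'z' or 'A' <= a <= 'Z') and ('a' <= b <= 'z' or 'A' <= b <= 'Z'):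
--             result.append((a + b).lower())
--     return result
-- ===== Notes on version B (the rewrite author's own statement) =====
-- stated objective: simpler
-- what changed: Replaces the stateful running-buffer accumulator (build current, reset on non-letter, emit and carry on length 2) with a stateless single pass over adjacent character pairs via zip, emitting the lowered bigram when both characters are ASCII letters.
import Mathlib
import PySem

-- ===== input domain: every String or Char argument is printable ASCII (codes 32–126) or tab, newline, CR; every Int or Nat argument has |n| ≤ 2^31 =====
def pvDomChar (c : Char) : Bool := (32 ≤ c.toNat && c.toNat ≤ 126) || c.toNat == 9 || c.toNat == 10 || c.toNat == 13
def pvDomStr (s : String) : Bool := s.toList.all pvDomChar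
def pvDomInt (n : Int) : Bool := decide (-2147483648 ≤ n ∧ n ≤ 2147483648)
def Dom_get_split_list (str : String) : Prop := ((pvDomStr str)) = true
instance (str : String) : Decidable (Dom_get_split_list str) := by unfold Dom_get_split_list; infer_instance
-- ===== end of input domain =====

-- B changes only the decomposition: a stateless pass over adjacent pairs instead of A's
-- running buffer with reset/carry; same output, same O(n) cost.

-- the exact ASCII range test of both Pythons: 'a' <= c <= 'z' or 'A' <= c <= 'Z'
def pvIsAlpha (c : Char) : Bool := ('a' ≤ c && c ≤ 'z') || ('A' ≤ c && c ≤ 'Z')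

-- ===== PORT A =====
-- loop body of A; current kept as List Char ("" = []); current[-1] of a length-2 list = drop 1
def pvStepA (st : List String × List Char) (c : Char) : List String × List Char :=
  let current := if pvIsAlpha c then st.2 ++ [PySem.Chars.lowerChar c] else []
  if current.length = 2 then (st.1 ++ [String.mk current], current.drop 1)
  else (st.1, current)

def get_split_list (str : String) : List String :=
  (str.toList.foldl pvStepA ([], [])).1

-- ===== PORT B =====
def get_split_list_alt (str : String) : List String :=
  let cs := str.toList
  (cs.zip cs.tail).foldl
    (fun result p =>
      if pvIsAlpha p.1 && pvIsAlpha p.2 then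
        result ++ [String.mk (PySem.Chars.lower [p.1, p.2])]
      else result) []

-- ===== PRECONDITION & SPEC =====
def Spec_get_split_list (str : String) (out : List String) : Prop := out = get_split_list_alt str
instance (str : String) (out : List String) : Decidable (Spec_get_split_list str out) := by unfold Spec_get_split_list; infer_instance

-- ===== CLAIM (what is proved, stated in full; the proofs are below) =====
def Claim_equal_get_split_list : Prop := ∀ (str : String), Dom_get_split_list str → Spec_get_split_list str (get_split_list str)

-- ===== LEMMAS AND PROOFS =====

-- recursive characterisation of the bigram list
def pvBigrams : List Char → List String
  | c1 :: c2 :: rest =>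
      (if pvIsAlpha c1 && pvIsAlpha c2 then
        [String.mk [PySem.Chars.lowerChar c1, PySem.Chars.lowerChar c2]] else [])
      ++ pvBigrams (c2 :: rest)
  | _ => []

lemma pvBigrams_cons_not (c : Char) (cs : List Char) (h : pvIsAlpha c = false) :
    pvBigrams (c :: cs) = pvBigrams cs := by
  cases cs with
  | nil => rfl
  | cons c2 rest => simp [pvBigrams, h]

-- B's fold over adjacent pairs computes pvBigrams
lemma foldB_eq (cs : List Char) : ∀ (acc : List String),
    (cs.zip cs.tail).foldl
      (fun result p =>
        if pvIsAlpha p.1 && pvIsAlpha p.2 then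
          result ++ [String.mk (PySem.Chars.lower [p.1, p.2])]
        else result) acc = acc ++ pvBigrams cs := by
  induction cs with
  | nil => intro acc; simp [pvBigrams]
  | cons c1 cs ih =>
    intro acc
    cases cs with
    | nil => simp [pvBigrams]
    | cons c2 rest =>
      simp only [List.tail_cons, List.zip_cons_cons, List.foldl_cons]
      simp only [List.tail_cons] at ih
      rw [ih]
      by_cases h : (pvIsAlpha c1 && pvIsAlpha c2) = true <;>
        simp [pvBigrams, h, PySem.Chars.lower]

-- A's fold: the two reachable states ([] and one lowered letter) both yield pvBigrams
lemma foldA_eq (cs : List Char) :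
    (∀ acc : List String, (cs.foldl pvStepA (acc, [])).1 = acc ++ pvBigrams cs) ∧
    (∀ (acc : List String) (c : Char), pvIsAlpha c = true →
      (cs.foldl pvStepA (acc, [PySem.Chars.lowerChar c])).1 = acc ++ pvBigrams (c :: cs)) := by
  induction cs with
  | nil =>
    constructor
    · intro acc; simp [pvBigrams]
    · intro acc c _; simp [pvBigrams]
  | cons c1 cs ih =>
    constructor
    · intro acc
      by_cases h : pvIsAlpha c1 = true
      · have := ih.2 acc c1 h
        simp only [List.foldl_cons, pvStepA, h, if_true]
        simpa using this
      · have h' : pvIsAlpha c1 = false := by simpa using h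
        have := ih.1 acc
        simp only [List.foldl_cons, pvStepA, h', if_false, Bool.false_eq_true]
        rw [pvBigrams_cons_not c1 cs h']
        simpa using this
    · intro acc c hc
      by_cases h : pvIsAlpha c1 = true
      · have := ih.2 (acc ++ [String.mk [PySem.Chars.lowerChar c, PySem.Chars.lowerChar c1]]) c1 h
        simp only [List.foldl_cons, pvStepA, h, if_true]
        simp only [List.cons_append, List.nil_append]
        have hg : pvBigrams (c :: c1 :: cs) =
            [String.mk [PySem.Chars.lowerChar c, PySem.Chars.lowerChar c1]] ++ pvBigrams (c1 :: cs) := by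
          simp [pvBigrams, hc, h]
        rw [hg]
        simpa [List.append_assoc] using this
      · have h' : pvIsAlpha c1 = false := by simpa using h
        have := ih.1 acc
        simp only [List.foldl_cons, pvStepA, h', if_false, Bool.false_eq_true]
        have hg : pvBigrams (c :: c1 :: cs) = pvBigrams cs := by
          simp [pvBigrams, h', pvBigrams_cons_not c1 cs h']
        rw [hg]
        simpa using this

-- ===== VERDICT (by name: the statement is the Claim_ definition above) =====
theorem get_split_list_spec : Claim_equal_get_split_list := by
  intro str _
  unfold Spec_get_split_list get_split_list get_split_list_alt
  rw [(foldA_eq str.toList).1 [], foldB_eq str.toList []]
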